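-- pv_equiv track=rewrite | github.com/Rbuds/coding_Projects | connectivityClustering.py | consolidateOne
-- ===== SOURCE A (Python) =====
-- def consolidateOne(neighborhoods):  # finds one pair of neighborhoods to consolidate and returns revised neighborhoods
-- 	for i in range(0, len(neighborhoods)):
-- 		for j in range(0, len(neighborhoods)):
-- 			if i != j:  # do not consolidate neighborhood with self or remove
-- 				if len(neighborhoods[i].intersection(neighborhoods[j])) > 0:
-- 					neighborhoods[i].update(neighborhoods[j])
-- 					neighborhoods.remove(neighborhoods[j])
-- 					return neighborhoods
-- 	return neighborhoods
-- ===== SOURCE B (Python) =====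
-- def consolidateOne(neighborhoods):  # element -> (first, second) set-index map; one pass to find the merge pair
-- 	occ = {}
-- 	for idx, s in enumerate(neighborhoods):
-- 		for e in s:
-- 			if e not in occ:
-- 				occ[e] = (idx, None)
-- 			elif occ[e][1] is None:
-- 				occ[e] = (occ[e][0], idx)
-- 	pair = None
-- 	for idx, s in enumerate(neighborhoods):
-- 		partner = None
-- 		for e in s:
-- 			m1, m2 = occ[e]
-- 			p = m1 if m1 != idx else m2
-- 			if p is not None and (partner is None or p < partner):
-- 				partner = p
-- 		if partner is not None:
-- 			pair = (idx, partner)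
-- 			break
-- 	if pair is None:
-- 		return neighborhoods
-- 	i, j = pair
-- 	neighborhoods[i].update(neighborhoods[j])
-- 	neighborhoods.remove(neighborhoods[j])
-- 	return neighborhoods
-- ===== Notes on version B (the rewrite author's own statement) =====
-- stated objective: alternative
-- what changed: Replaces the nested all-pairs intersection scan by a single pass that builds an element -> (first, second) set-index dictionary and reads the merge pair off it; the merge step (update + remove, mutating the argument like A) is unchanged. A's early exit on the first overlapping pair makes A competitive on random inputs, so no speed is claimed.
import Mathlib
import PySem

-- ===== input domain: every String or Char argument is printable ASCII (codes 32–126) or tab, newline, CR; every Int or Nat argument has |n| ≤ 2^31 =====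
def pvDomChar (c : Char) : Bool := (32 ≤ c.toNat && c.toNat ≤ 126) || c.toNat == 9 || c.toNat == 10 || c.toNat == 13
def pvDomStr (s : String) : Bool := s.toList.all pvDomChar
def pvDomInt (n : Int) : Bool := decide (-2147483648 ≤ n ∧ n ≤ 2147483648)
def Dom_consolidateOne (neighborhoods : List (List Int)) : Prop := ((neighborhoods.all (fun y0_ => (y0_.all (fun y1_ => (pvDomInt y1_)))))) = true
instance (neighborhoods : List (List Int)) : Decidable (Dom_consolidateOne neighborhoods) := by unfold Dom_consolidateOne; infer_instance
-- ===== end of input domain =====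

-- B replaces A's all-pairs intersection scan with an element -> (first, second) set-index map built in
-- one pass; the merge step is the same. Equivalence is about the RETURN value only (the Python A mutates
-- its argument in place, and the Python B performs the same mutation).

-- ===== PORT A =====
-- shared merge step (the last three lines of both Pythons: update set i, remove the first set equal to set j)
def pvSetEqRemove : List (List Int) → List Int → List (List Int)
  | [], _ => []
  | x :: xs, t => if PySem.Set.equal x t then xs else x :: pvSetEqRemove xs t

def pvMerge (nb : List (List Int)) (i j : Nat) : List (List Int) :=
  let sj := nb.getD j []
  pvSetEqRemove (nb.set i (PySem.Set.update (nb.getD i []) sj)) sj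

def consolidateOne (neighborhoods : List (List Int)) : List (List Int) :=
  match (List.range neighborhoods.length).findSome? (fun i =>
      (List.range neighborhoods.length).findSome? (fun j =>
        if i ≠ j ∧ 0 < (PySem.Set.inter (neighborhoods.getD i []) (neighborhoods.getD j [])).length
        then some (i, j) else none)) with
  | some (i, j) => pvMerge neighborhoods i j
  | none => neighborhoods

-- ===== PORT B =====
def pvOccAdd (occ : PySem.Dict Int (Nat × Option Nat)) (e : Int) (idx : Nat) :
    PySem.Dict Int (Nat × Option Nat) :=
  match occ.get? e with
  | none => occ.insert e (idx, none)
  | some (m1, none) => occ.insert e (m1, some idx)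
  | some _ => occ

def pvOccFrom : List (List Int) → Nat → PySem.Dict Int (Nat × Option Nat) →
    PySem.Dict Int (Nat × Option Nat)
  | [], _, occ => occ
  | s :: rest, idx, occ => pvOccFrom rest (idx + 1) (s.foldl (fun o e => pvOccAdd o e idx) occ)

-- 'if p is not None and (partner is None or p < partner): partner = p'
def pvMinOpt (partner p : Option Nat) : Option Nat :=
  match p, partner with
  | none, _ => partner
  | some p, none => some p
  | some p, some q => if p < q then some p else some q

def pvPartner (occ : PySem.Dict Int (Nat × Option Nat)) (s : List Int) (i : Nat) : Option Nat :=
  s.foldl (fun partner e =>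
    let md := occ.getD e (0, none)
    pvMinOpt partner (if md.1 ≠ i then some md.1 else md.2)) none

def pvFindPair (occ : PySem.Dict Int (Nat × Option Nat)) :
    List (List Int) → Nat → Option (Nat × Nat)
  | [], _ => none
  | s :: rest, idx =>
    match pvPartner occ s idx with
    | some j => some (idx, j)
    | none => pvFindPair occ rest (idx + 1)

def consolidateOne_alt (neighborhoods : List (List Int)) : List (List Int) :=
  let occ := pvOccFrom neighborhoods 0 PySem.Dict.empty
  match pvFindPair occ neighborhoods 0 with
  | some (i, j) => pvMerge neighborhoods i j
  | none => neighborhoods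

-- ===== PRECONDITION & SPEC =====
-- Pre_ requires each inner list to hold distinct elements: the lists stand for Python sets (type
-- convention set -> List of the DISTINCT elements), and a set can never hand its consumer a duplicate.
def Pre_consolidateOne (neighborhoods : List (List Int)) : Prop :=
  ∀ s ∈ neighborhoods, s.Nodup
instance (neighborhoods : List (List Int)) : Decidable (Pre_consolidateOne neighborhoods) := by
  unfold Pre_consolidateOne; infer_instance

def pvWitness_consolidateOne : List (List Int) := [[1, 2], [3], [2, 4]]

def Spec_consolidateOne (neighborhoods : List (List Int)) (out : List (List Int)) : Prop :=
  out = consolidateOne_alt neighborhoods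
instance (neighborhoods : List (List Int)) (out : List (List Int)) :
    Decidable (Spec_consolidateOne neighborhoods out) := by unfold Spec_consolidateOne; infer_instance

-- ===== CLAIM (what is proved, stated in full; the proofs are below) =====
def Claim_equal_consolidateOne : Prop := ∀ (neighborhoods : List (List Int)),
  Dom_consolidateOne neighborhoods → Pre_consolidateOne neighborhoods →
  Spec_consolidateOne neighborhoods (consolidateOne neighborhoods)

-- ===== LEMMAS AND PROOFS =====

-- the indices (in increasing order, offset by `start`) of the sets containing e
def pvIdxsFrom : List (List Int) → Nat → Int → List Nat
  | [], _, _ => []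
  | s :: rest, k, e => (if e ∈ s then [k] else []) ++ pvIdxsFrom rest (k + 1) e

-- the per-key effect of pvOccAdd
def pvStep : Option (Nat × Option Nat) → Nat → Option (Nat × Option Nat)
  | none, a => some (a, none)
  | some (m1, none), a => some (m1, some a)
  | some v, _ => some v

def pvAddIdxs : Option (Nat × Option Nat) → List Nat → Option (Nat × Option Nat)
  | o, [] => o
  | o, a :: rest => pvAddIdxs (pvStep o a) rest

def pvFirstTwo : List Nat → Option (Nat × Option Nat)
  | [] => none
  | [a] => some (a, none)
  | a :: b :: _ => some (a, some b)

theorem pvOccAdd_get_self (occ : PySem.Dict Int (Nat × Option Nat)) (e : Int) (idx : Nat) :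
    (pvOccAdd occ e idx).get? e = pvStep (occ.get? e) idx := by
  unfold pvOccAdd pvStep
  rcases h : occ.get? e with _ | ⟨m1, _ | m2⟩ <;>
    simp [h, PySem.Dict.get?_insert_self]

theorem pvOccAdd_get_ne (occ : PySem.Dict Int (Nat × Option Nat)) (e e' : Int) (idx : Nat)
    (h : e' ≠ e) : (pvOccAdd occ e idx).get? e' = occ.get? e' := by
  unfold pvOccAdd
  rcases h2 : occ.get? e with _ | ⟨m1, _ | m2⟩ <;>
    simp [PySem.Dict.get?_insert_of_ne _ _ h]

theorem pvFoldOcc_get (s : List Int) (occ : PySem.Dict Int (Nat × Option Nat)) (idx : Nat)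
    (hs : s.Nodup) (e : Int) :
    (s.foldl (fun o x => pvOccAdd o x idx) occ).get? e =
      if e ∈ s then pvStep (occ.get? e) idx else occ.get? e := by
  induction s generalizing occ with
  | nil => simp
  | cons x s' ih =>
    rw [List.nodup_cons] at hs
    rw [List.foldl_cons, ih _ hs.2]
    by_cases hex : e = x
    · subst hex
      simp [hs.1, pvOccAdd_get_self]
    · simp [pvOccAdd_get_ne _ _ _ _ hex, hex]

theorem pvOccFrom_get (rest : List (List Int)) (start : Nat)
    (occ : PySem.Dict Int (Nat × Option Nat)) (h : ∀ s ∈ rest, s.Nodup) (e : Int) :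
    (pvOccFrom rest start occ).get? e = pvAddIdxs (occ.get? e) (pvIdxsFrom rest start e) := by
  induction rest generalizing start occ with
  | nil => simp [pvOccFrom, pvIdxsFrom, pvAddIdxs]
  | cons s rest ih =>
    rw [pvOccFrom, ih _ _ (fun t ht => h t (List.mem_cons_of_mem _ ht)),
      pvFoldOcc_get _ _ _ (h s List.mem_cons_self),
      show pvIdxsFrom (s :: rest) start e
        = (if e ∈ s then [start] else []) ++ pvIdxsFrom rest (start + 1) e from rfl]
    by_cases he : e ∈ s <;> simp [he, pvAddIdxs]

theorem pvAddIdxs_none (l : List Nat) : pvAddIdxs none l = pvFirstTwo l := by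
  match l with
  | [] => rfl
  | [a] => rfl
  | a :: b :: rest =>
    show pvAddIdxs (some (a, some b)) rest = _
    induction rest with
    | nil => rfl
    | cons c t ih => exact ih

theorem mem_pvIdxsFrom (rest : List (List Int)) (start : Nat) (e : Int) (j : Nat) :
    j ∈ pvIdxsFrom rest start e ↔
      ∃ k, k < rest.length ∧ j = start + k ∧ e ∈ rest.getD k [] := by
  induction rest generalizing start with
  | nil => simp [pvIdxsFrom]
  | cons s rest ih =>
    unfold pvIdxsFrom
    constructor
    · intro hj
      rcases List.mem_append.1 hj with h1 | h2
      · by_cases he : e ∈ s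
        · simp [he] at h1
          exact ⟨0, by simp, by omega, by simpa using he⟩
        · simp [he] at h1
      · rcases (ih (start + 1)).1 h2 with ⟨k, hk, hj', hm⟩
        exact ⟨k + 1, by simpa using hk, by omega, by simpa using hm⟩
    · rintro ⟨k, hk, rfl, hm⟩
      rcases k with _ | k
      · simp at hm
        simp [hm]
      · refine List.mem_append.2 (Or.inr ((ih (start + 1)).2 ⟨k, by simpa using hk, by omega, by simpa using hm⟩))

theorem pairwise_pvIdxsFrom (rest : List (List Int)) (start : Nat) (e : Int) :
    (pvIdxsFrom rest start e).Pairwise (· < ·) := by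
  induction rest generalizing start with
  | nil => simp [pvIdxsFrom]
  | cons s rest ih =>
    unfold pvIdxsFrom
    rw [List.pairwise_append]
    refine ⟨?_, ih (start + 1), ?_⟩
    · by_cases he : e ∈ s <;> simp [he]
    · intro a ha b hb
      have : start + 1 ≤ b := by
        rcases (mem_pvIdxsFrom _ _ _ _).1 hb with ⟨k, _, rfl, _⟩; omega
      by_cases he : e ∈ s <;> simp [he] at ha; omega


-- generic characterizations of findSome? over List.range
theorem findSome?_range_none {β : Type} (F : Nat → Option β) (n : Nat) :
    (List.range n).findSome? F = none ↔ ∀ k < n, F k = none := by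
  induction n with
  | zero => simp
  | succ n ih =>
    rw [List.range_succ, List.findSome?_append]
    have hsing : List.findSome? F [n] = F n := by
      cases h2 : F n <;> simp [List.findSome?_cons, h2]
    rw [hsing]
    constructor
    · intro h k hk
      have h1 : List.findSome? F (List.range n) = none ∧ F n = none := by
        cases ha : List.findSome? F (List.range n) <;> cases hb : F n <;>
          rw [ha, hb] at h <;> simp_all [Option.or]
      rcases Nat.lt_succ_iff_lt_or_eq.1 hk with h' | rfl
      · exact ih.1 h1.1 k h'
      · exact h1.2
    · intro h
      rw [ih.2 (fun k hk => h k (Nat.lt_succ_of_lt hk)), h n (Nat.lt_succ_self n)]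
      rfl

theorem findSome?_range_some {β : Type} (F : Nat → Option β) (n : Nat) (b : β) :
    (List.range n).findSome? F = some b ↔
      ∃ k, k < n ∧ F k = some b ∧ ∀ m < k, F m = none := by
  induction n generalizing b with
  | zero => simp
  | succ n ih =>
    rw [List.range_succ, List.findSome?_append]
    cases hpfx : (List.range n).findSome? F with
    | some c =>
      rcases (ih c).1 hpfx with ⟨k0, hk0, hF0, hmin0⟩
      simp only [Option.some_or]
      constructor
      · intro h
        injection h with h
        subst h
        exact ⟨k0, Nat.lt_succ_of_lt hk0, hF0, hmin0⟩
      · rintro ⟨k, hk, hF, hmin⟩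
        have hkk : k = k0 := by
          rcases Nat.lt_trichotomy k k0 with h' | h' | h'
          · rw [hmin0 k h'] at hF; exact absurd hF (by simp)
          · exact h'
          · rw [hmin k0 h'] at hF0; exact absurd hF0 (by simp)
        subst hkk
        rw [← hF0]
        exact hF
    | none =>
      have hall := (findSome?_range_none F n).1 hpfx
      have hsing : List.findSome? F [n] = F n := by
        cases h2 : F n <;> simp [List.findSome?_cons, h2]
      simp only [Option.none_or, hsing]
      constructor
      · intro h
        exact ⟨n, Nat.lt_succ_self n, h, fun m hm => hall m hm⟩
      · rintro ⟨k, hk, hF, hmin⟩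
        rcases Nat.lt_succ_iff_lt_or_eq.1 hk with h' | rfl
        · exact absurd hF (by simp [hall k h'])
        · exact hF

-- pvMinOpt is "min with none = +infinity"
theorem pvMinOpt_eq_none (a b : Option Nat) : pvMinOpt a b = none ↔ a = none ∧ b = none := by
  rcases a with _ | p <;> rcases b with _ | q <;> simp [pvMinOpt] <;> split <;> simp

theorem pvMinOpt_eq_some (a b : Option Nat) (j : Nat) (h : pvMinOpt a b = some j) :
    a = some j ∨ b = some j := by
  rcases b with _ | q
  · exact Or.inl h
  · rcases a with _ | p
    · exact Or.inr h
    · have h' : (if q < p then some q else some p : Option Nat) = some j := h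
      by_cases hqp : q < p
      · rw [if_pos hqp] at h'; exact Or.inr h'
      · rw [if_neg hqp] at h'; exact Or.inl h'

theorem pvMinOpt_some_left (a b : Option Nat) (k : Nat) (ha : a = some k) :
    ∃ j, pvMinOpt a b = some j ∧ j ≤ k := by
  subst ha
  rcases b with _ | q
  · exact ⟨k, rfl, le_refl k⟩
  · by_cases hq : q < k
    · refine ⟨q, ?_, by omega⟩
      show (if q < k then some q else some k : Option Nat) = some q
      rw [if_pos hq]
    · refine ⟨k, ?_, le_refl k⟩
      show (if q < k then some q else some k : Option Nat) = some k
      rw [if_neg hq]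

theorem pvMinOpt_some_right (a b : Option Nat) (k : Nat) (hb : b = some k) :
    ∃ j, pvMinOpt a b = some j ∧ j ≤ k := by
  subst hb
  rcases a with _ | p
  · exact ⟨k, rfl, le_refl k⟩
  · by_cases hk : k < p
    · refine ⟨k, ?_, le_refl k⟩
      show (if k < p then some k else some p : Option Nat) = some k
      rw [if_pos hk]
    · refine ⟨p, ?_, by omega⟩
      show (if k < p then some k else some p : Option Nat) = some p
      rw [if_neg hk]

theorem foldl_minOpt_none {α : Type} (l : List α) (f : α → Option Nat) (acc : Option Nat) :
    l.foldl (fun a x => pvMinOpt a (f x)) acc = none ↔ acc = none ∧ ∀ x ∈ l, f x = none := by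
  induction l generalizing acc with
  | nil => simp
  | cons x t ih =>
    rw [List.foldl_cons, ih, pvMinOpt_eq_none]
    constructor
    · rintro ⟨⟨h1, h2⟩, h3⟩
      exact ⟨h1, fun y hy => by rcases List.mem_cons.1 hy with rfl | hy'; exacts [h2, h3 y hy']⟩
    · rintro ⟨h1, h2⟩
      exact ⟨⟨h1, h2 x List.mem_cons_self⟩, fun y hy => h2 y (List.mem_cons_of_mem _ hy)⟩

theorem foldl_minOpt_some {α : Type} (l : List α) (f : α → Option Nat) (acc : Option Nat)
    (j : Nat) (h : l.foldl (fun a x => pvMinOpt a (f x)) acc = some j) :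
    (acc = some j ∨ ∃ x ∈ l, f x = some j) ∧ (∀ k, acc = some k → j ≤ k) ∧
      (∀ x ∈ l, ∀ k, f x = some k → j ≤ k) := by
  induction l generalizing acc with
  | nil => simp at h; simp [h]
  | cons x t ih =>
    rw [List.foldl_cons] at h
    rcases ih _ h with ⟨hmem, hacc, hel⟩
    refine ⟨?_, ?_, ?_⟩
    · rcases hmem with hm | ⟨y, hy, hfy⟩
      · rcases pvMinOpt_eq_some _ _ _ hm with h' | h'
        · exact Or.inl h'
        · exact Or.inr ⟨x, List.mem_cons_self, h'⟩
      · exact Or.inr ⟨y, List.mem_cons_of_mem _ hy, hfy⟩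
    · intro k hk
      rcases pvMinOpt_some_left acc (f x) k hk with ⟨j2, hj2, hj2k⟩
      exact le_trans (hacc _ hj2) hj2k
    · intro y hy k hfy
      rcases List.mem_cons.1 hy with rfl | hy'
      · rcases pvMinOpt_some_right acc (f y) k hfy with ⟨j2, hj2, hj2k⟩
        exact le_trans (hacc _ hj2) hj2k
      · exact hel y hy' k hfy

-- the overlap relation the pair search is about: j is a valid partner index for i
def pvQ (nb : List (List Int)) (i j : Nat) : Prop :=
  j < nb.length ∧ j ≠ i ∧ ∃ e ∈ nb.getD i [], e ∈ nb.getD j []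

theorem mem_pvIdxs_zero (nb : List (List Int)) (e : Int) (j : Nat) :
    j ∈ pvIdxsFrom nb 0 e ↔ j < nb.length ∧ e ∈ nb.getD j [] := by
  rw [mem_pvIdxsFrom]
  constructor
  · rintro ⟨k, hk, rfl, hm⟩; simpa using ⟨hk, hm⟩
  · rintro ⟨hj, hm⟩; exact ⟨j, hj, by omega, hm⟩

-- per-element value p: the least index ≠ i of a set containing e
theorem pe_char (nb : List (List Int)) (hpre : ∀ s ∈ nb, s.Nodup) (i : Nat)
    (hi : i < nb.length) (e : Int) (he : e ∈ nb.getD i []) :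
    (∀ j, (if ((pvOccFrom nb 0 PySem.Dict.empty).getD e (0, none)).1 ≠ i
            then some ((pvOccFrom nb 0 PySem.Dict.empty).getD e (0, none)).1
            else ((pvOccFrom nb 0 PySem.Dict.empty).getD e (0, none)).2) = some j →
        (j < nb.length ∧ e ∈ nb.getD j [] ∧ j ≠ i)) ∧
    (∀ k, k < nb.length → e ∈ nb.getD k [] → k ≠ i →
        ∃ j, (if ((pvOccFrom nb 0 PySem.Dict.empty).getD e (0, none)).1 ≠ i
               then some ((pvOccFrom nb 0 PySem.Dict.empty).getD e (0, none)).1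
               else ((pvOccFrom nb 0 PySem.Dict.empty).getD e (0, none)).2) = some j ∧ j ≤ k) := by
  have hget : (pvOccFrom nb 0 PySem.Dict.empty).get? e = pvFirstTwo (pvIdxsFrom nb 0 e) := by
    rw [pvOccFrom_get _ _ _ hpre, PySem.Dict.get?_empty, pvAddIdxs_none]
  have hiL : i ∈ pvIdxsFrom nb 0 e := (mem_pvIdxs_zero nb e i).2 ⟨hi, he⟩
  have hpair : (pvIdxsFrom nb 0 e).Pairwise (· < ·) := pairwise_pvIdxsFrom nb 0 e
  rcases hL : pvIdxsFrom nb 0 e with _ | ⟨a, _ | ⟨b, rest⟩⟩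
  · rw [hL] at hiL; simp at hiL
  · -- singleton [a]: then i = a and there is no other index containing e
    rw [hL] at hiL hget
    simp at hiL
    subst hiL
    have hmd : (pvOccFrom nb 0 PySem.Dict.empty).getD e (0, none) = (i, none) := by
      rw [PySem.Dict.getD_eq_get?_getD, hget]; rfl
    rw [hmd]
    simp only [ne_eq, not_true_eq_false]
    refine ⟨by simp, ?_⟩
    intro k hk hke hki
    have : k ∈ pvIdxsFrom nb 0 e := (mem_pvIdxs_zero nb e k).2 ⟨hk, hke⟩
    rw [hL] at this; simp at this; omega
  · -- two or more indices
    rw [hL] at hiL hget hpair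
    have hmd : (pvOccFrom nb 0 PySem.Dict.empty).getD e (0, none) = (a, some b) := by
      rw [PySem.Dict.getD_eq_get?_getD, hget]; rfl
    rw [hmd]
    rw [List.pairwise_cons] at hpair
    have hab : a < b := hpair.1 b List.mem_cons_self
    have haleast : ∀ x ∈ a :: b :: rest, a ≤ x := by
      intro x hx
      rcases List.mem_cons.1 hx with rfl | hx'
      · exact le_refl x
      · exact le_of_lt (hpair.1 x hx')
    have hbleast : ∀ x ∈ b :: rest, b ≤ x := by
      intro x hx
      rcases List.mem_cons.1 hx with rfl | hx'
      · exact le_refl x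
      · exact le_of_lt ((List.pairwise_cons.1 hpair.2).1 x hx')
    have hmem : ∀ x, x ∈ a :: b :: rest → x < nb.length ∧ e ∈ nb.getD x [] := by
      intro x hx
      exact (mem_pvIdxs_zero nb e x).1 (by rw [hL]; exact hx)
    by_cases hai : a = i
    · subst hai
      simp only [ne_eq, not_true_eq_false]
      constructor
      · rintro j hj
        injection hj with hj
        subst hj
        rcases hmem b (by simp) with ⟨h1, h2⟩
        exact ⟨h1, h2, by omega⟩
      · intro k hk hke hka
        have hkL : k ∈ a :: b :: rest := by
          rw [← hL]; exact (mem_pvIdxs_zero nb e k).2 ⟨hk, hke⟩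
        rcases List.mem_cons.1 hkL with rfl | hk'
        · omega
        · exact ⟨b, rfl, hbleast k hk'⟩
    · simp only [ne_eq, hai, not_false_eq_true, if_pos]
      constructor
      · rintro j hj
        injection hj with hj
        subst hj
        rcases hmem a (by simp) with ⟨h1, h2⟩
        exact ⟨h1, h2, hai⟩
      · intro k hk hke hka
        have hkL : k ∈ a :: b :: rest := by
          rw [← hL]; exact (mem_pvIdxs_zero nb e k).2 ⟨hk, hke⟩
        exact ⟨a, rfl, haleast k hkL⟩

theorem partner_none_iff (nb : List (List Int)) (hpre : ∀ s ∈ nb, s.Nodup) (i : Nat)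
    (hi : i < nb.length) :
    pvPartner (pvOccFrom nb 0 PySem.Dict.empty) (nb.getD i []) i = none ↔
      ∀ j, ¬ pvQ nb i j := by
  unfold pvPartner
  rw [foldl_minOpt_none]
  constructor
  · rintro ⟨-, hall⟩ j ⟨hj, hji, e, he, hej⟩
    rcases (pe_char nb hpre i hi e he).2 j hj hej hji with ⟨j', hj', -⟩
    have := hall e he
    simp only [this] at hj'
    exact absurd hj' (by simp)
  · intro hnoQ
    refine ⟨rfl, fun e he => ?_⟩
    cases hpe : (if ((pvOccFrom nb 0 PySem.Dict.empty).getD e (0, none)).1 ≠ i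
        then some ((pvOccFrom nb 0 PySem.Dict.empty).getD e (0, none)).1
        else ((pvOccFrom nb 0 PySem.Dict.empty).getD e (0, none)).2) with
    | none => rfl
    | some j =>
      rcases (pe_char nb hpre i hi e he).1 j hpe with ⟨h1, h2, h3⟩
      exact absurd ⟨h1, h3, e, he, h2⟩ (hnoQ j)

theorem partner_some (nb : List (List Int)) (hpre : ∀ s ∈ nb, s.Nodup) (i : Nat)
    (hi : i < nb.length) (j : Nat)
    (h : pvPartner (pvOccFrom nb 0 PySem.Dict.empty) (nb.getD i []) i = some j) :
    pvQ nb i j ∧ ∀ k, pvQ nb i k → j ≤ k := by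
  unfold pvPartner at h
  rcases foldl_minOpt_some _ _ _ _ h with ⟨hmem, -, hel⟩
  rcases hmem with hm | ⟨e, he, hfe⟩
  · simp at hm
  · rcases (pe_char nb hpre i hi e he).1 j hfe with ⟨h1, h2, h3⟩
    refine ⟨⟨h1, h3, e, he, h2⟩, ?_⟩
    rintro k ⟨hk, hki, e', he', hek⟩
    rcases (pe_char nb hpre i hi e' he').2 k hk hek hki with ⟨j', hj', hjk⟩
    exact le_trans (hel e' he' j' hj') hjk

theorem findPair_none_iff (occ : PySem.Dict Int (Nat × Option Nat)) (l : List (List Int))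
    (start : Nat) :
    pvFindPair occ l start = none ↔
      ∀ k < l.length, pvPartner occ (l.getD k []) (start + k) = none := by
  induction l generalizing start with
  | nil => simp [pvFindPair]
  | cons s rest ih =>
    unfold pvFindPair
    cases hp : pvPartner occ s start with
    | some j =>
      simp only []
      constructor
      · intro h; simp at h
      · intro h
        have := h 0 (by simp)
        simp at this
        rw [this] at hp; simp at hp
    | none =>
      simp only [ih]
      constructor
      · intro h k hk
        rcases k with _ | k
        · simpa using hp
        · have := h k (by simpa using hk)
          simpa [Nat.add_comm, Nat.add_left_comm, Nat.add_assoc] using this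
      · intro h k hk
        have := h (k + 1) (by simpa using hk)
        simpa [Nat.add_comm, Nat.add_left_comm, Nat.add_assoc] using this

theorem findPair_some_iff (occ : PySem.Dict Int (Nat × Option Nat)) (l : List (List Int))
    (start : Nat) (i j : Nat) :
    pvFindPair occ l start = some (i, j) ↔
      ∃ k, k < l.length ∧ i = start + k ∧
        pvPartner occ (l.getD k []) (start + k) = some j ∧
        ∀ m < k, pvPartner occ (l.getD m []) (start + m) = none := by
  induction l generalizing start with
  | nil => simp [pvFindPair]
  | cons s rest ih =>
    unfold pvFindPair
    cases hp : pvPartner occ s start with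
    | some j0 =>
      constructor
      · intro h
        obtain ⟨rfl, rfl⟩ : start = i ∧ j0 = j := by simpa using h
        exact ⟨0, by simp, by omega, by simpa using hp,
          fun m hm => absurd hm (Nat.not_lt_zero m)⟩
      · rintro ⟨k, hk, rfl, hF, hmin⟩
        rcases k with _ | k
        · simp at hF
          rw [hp] at hF
          injection hF with hF
          simp [hF]
        · have h0 := hmin 0 (by omega)
          simp at h0
          rw [h0] at hp
          simp at hp
    | none =>
      simp only [ih]
      constructor
      · rintro ⟨k, hk, rfl, hF, hmin⟩
        refine ⟨k + 1, by simpa using hk, by omega, ?_, ?_⟩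
        · simpa [Nat.add_comm, Nat.add_left_comm, Nat.add_assoc] using hF
        · intro m hm
          rcases m with _ | m
          · simpa using hp
          · have := hmin m (by omega)
            simpa [Nat.add_comm, Nat.add_left_comm, Nat.add_assoc] using this
      · rintro ⟨k, hk, hi, hF, hmin⟩
        rcases k with _ | k
        · simp at hF
          rw [hF] at hp; simp at hp
        · refine ⟨k, by simpa using hk, by omega, ?_, ?_⟩
          · simpa [Nat.add_comm, Nat.add_left_comm, Nat.add_assoc] using hF
          · intro m hm
            have := hmin (m + 1) (by omega)
            simpa [Nat.add_comm, Nat.add_left_comm, Nat.add_assoc] using this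

theorem cond_iff_pvQ (nb : List (List Int)) (i j : Nat) (hj : j < nb.length) :
    (i ≠ j ∧ 0 < (PySem.Set.inter (nb.getD i []) (nb.getD j [])).length) ↔ pvQ nb i j := by
  unfold pvQ
  rw [List.length_pos_iff_exists_mem]
  constructor
  · rintro ⟨hij, e, he⟩
    rw [PySem.Set.mem_inter] at he
    exact ⟨hj, fun h => hij h.symm, e, he.1, he.2⟩
  · rintro ⟨-, hji, e, he1, he2⟩
    exact ⟨fun h => hji h.symm, e, (PySem.Set.mem_inter _ _ _).2 ⟨he1, he2⟩⟩

theorem pairA_eq_pairB (nb : List (List Int)) (hpre : ∀ s ∈ nb, s.Nodup) :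
    (List.range nb.length).findSome? (fun i =>
      (List.range nb.length).findSome? (fun j =>
        if i ≠ j ∧ 0 < (PySem.Set.inter (nb.getD i []) (nb.getD j [])).length
        then some (i, j) else none)) =
    pvFindPair (pvOccFrom nb 0 PySem.Dict.empty) nb 0 := by
  cases hB : pvFindPair (pvOccFrom nb 0 PySem.Dict.empty) nb 0 with
  | none =>
    have hall := (findPair_none_iff _ _ _).1 hB
    rw [findSome?_range_none]
    intro i hi
    rw [findSome?_range_none]
    intro k hk
    have hnoQ := (partner_none_iff nb hpre i hi).1 (by simpa using hall i hi)
    rw [if_neg]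
    intro hc
    exact hnoQ k ((cond_iff_pvQ nb i k hk).1 hc)
  | some p =>
    rcases p with ⟨i, j⟩
    rcases (findPair_some_iff _ _ _ _ _).1 hB with ⟨k, hk, hik, hF, hmin⟩
    have hik' : i = k := by omega
    subst hik'
    simp only [Nat.zero_add] at hF hmin
    rcases partner_some nb hpre i hk j (by simpa using hF) with ⟨hQ, hleast⟩
    rw [findSome?_range_some]
    refine ⟨i, hk, ?_, ?_⟩
    · rw [findSome?_range_some]
      refine ⟨j, hQ.1, ?_, ?_⟩
      · rw [if_pos ((cond_iff_pvQ nb i j hQ.1).2 hQ)]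
      · intro m hm
        have hmn : m < nb.length := lt_trans hm hQ.1
        rw [if_neg]
        intro hc
        have := hleast m ((cond_iff_pvQ nb i m hmn).1 hc)
        omega
    · intro m hm
      rw [findSome?_range_none]
      intro k2 hk2
      have hnoQ := (partner_none_iff nb hpre m (by omega)).1 (by simpa using hmin m hm)
      rw [if_neg]
      intro hc
      exact hnoQ k2 ((cond_iff_pvQ nb m k2 hk2).1 hc)

-- ===== VERDICT (by name: the statement is the Claim_ definition above) =====
theorem consolidateOne_spec : Claim_equal_consolidateOne := by
  intro nb _ hpre
  unfold Spec_consolidateOne consolidateOne consolidateOne_alt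
  rw [pairA_eq_pairB nb hpre]
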